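-- pv_equiv track=rewrite | github.com/phoenixkeiner/AntFarm | dual_path_template.py | split_route_into_segments
-- ===== SOURCE A (Python) =====
-- def split_route_into_segments(route, waypoints):
--     if not route or not waypoints:
--         return []
--
--     segments = []
--     route_list = list(route)
--     current_segment = [route_list[0]]
--     waypoint_idx = 0
--
--     for i in range(1, len(route_list)):
--         current_segment.append(route_list[i])
--
--         if waypoint_idx < len(waypoints) and route_list[i] == waypoints[waypoint_idx]:
--             segments.append(current_segment)
--             current_segment = [route_list[i]]
--             waypoint_idx += 1
--
--     if len(current_segment) > 1:
--         segments.append(current_segment)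
--
--     return segments
-- ===== SOURCE B (Python) =====
-- def split_route_into_segments(route, waypoints):
--     if not route or not waypoints:
--         return []
--
--     route_list = list(route)
--
--     # Pass 1: collect the indices where the next expected waypoint is hit.
--     cuts = []
--     wi = 0
--     for i, x in enumerate(route_list[1:], 1):
--         if wi < len(waypoints) and x == waypoints[wi]:
--             cuts.append(i)
--             wi += 1
--
--     # Pass 2: slice between consecutive boundaries (segments share the
--     # boundary element); keep the trailing slice only if it has >= 2 elements.
--     segments = []
--     start = 0
--     for c in cuts:
--         segments.append(route_list[start:c + 1])
--         start = c
--     tail = route_list[start:]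
--     if len(tail) > 1:
--         segments.append(tail)
--     return segments
-- ===== Notes on version B (the rewrite author's own statement) =====
-- stated objective: alternative
-- what changed: A builds each segment incrementally in a single pass carrying a current-segment accumulator; B makes two passes: first collect the waypoint-hit indices into a cut list, then slice the route between consecutive boundaries (overlapping by one element), keeping the trailing slice only if it has at least two elements.
import Mathlib
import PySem

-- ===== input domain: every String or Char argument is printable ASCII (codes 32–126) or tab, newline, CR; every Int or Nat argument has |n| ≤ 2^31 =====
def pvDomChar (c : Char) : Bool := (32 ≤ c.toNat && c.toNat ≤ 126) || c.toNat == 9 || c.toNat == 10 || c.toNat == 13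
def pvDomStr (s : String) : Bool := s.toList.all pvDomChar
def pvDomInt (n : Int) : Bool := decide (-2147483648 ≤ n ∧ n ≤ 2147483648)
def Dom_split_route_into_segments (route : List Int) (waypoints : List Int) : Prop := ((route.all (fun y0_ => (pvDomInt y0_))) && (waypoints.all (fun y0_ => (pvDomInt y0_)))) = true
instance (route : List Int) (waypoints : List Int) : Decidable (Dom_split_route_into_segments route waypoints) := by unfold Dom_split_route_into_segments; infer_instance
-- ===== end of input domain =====

-- B replaces A's one-pass accumulation of the current segment by two passes —
-- collect the waypoint-hit indices, then slice between consecutive boundaries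
-- (same cost, different decomposition: objective 'alternative').

-- ===== PORT A =====
-- A's loop body: append route_list[i] to the current segment, and on a waypoint
-- hit close the segment and restart it at the boundary element.
def aStep (waypoints : List Int) (st : List (List Int) × List Int × Int) (x : Int) :
    List (List Int) × List Int × Int :=
  let cur := st.2.1 ++ [x]
  if st.2.2 < (waypoints.length : Int) ∧ PySem.List.pyGetD waypoints st.2.2 0 = x then
    (st.1 ++ [cur], [x], st.2.2 + 1)
  else
    (st.1, cur, st.2.2)

-- A's trailing 'if len(current_segment) > 1: segments.append(current_segment)'.
def aFinish (st : List (List Int) × List Int × Int) : List (List Int) :=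
  if st.2.1.length > 1 then st.1 ++ [st.2.1] else st.1

-- 'for i in range(1, len(route_list))' reads exactly route_list[i], i.e. the tail.
def split_route_into_segments (route : List Int) (waypoints : List Int) : List (List Int) :=
  match route with
  | [] => []
  | r0 :: rest =>
    if waypoints = [] then []
    else aFinish (rest.foldl (aStep waypoints) ([], [r0], 0))

-- ===== PORT B =====
-- B's first pass: on (i, x) from enumerate(route_list[1:], 1), record i on a waypoint hit.
def bCutStep (waypoints : List Int) (st : List Int × Int) (ix : Int × Int) : List Int × Int :=
  if st.2 < (waypoints.length : Int) ∧ PySem.List.pyGetD waypoints st.2 0 = ix.2 then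
    (st.1 ++ [ix.1], st.2 + 1)
  else st

-- B's second pass body: segments.append(route_list[start:c+1]); start = c.
def bSegStep (route : List Int) (st : List (List Int) × Int) (c : Int) :
    List (List Int) × Int :=
  (st.1 ++ [PySem.List.slice route (some st.2) (some (c + 1))], c)

-- B's tail step: append route_list[start:] if it has more than one element.
def bFinish (route : List Int) (st : List (List Int) × Int) : List (List Int) :=
  if (PySem.List.slice route (some st.2) none).length > 1 then
    st.1 ++ [PySem.List.slice route (some st.2) none]
  else st.1

def split_route_into_segments_alt (route : List Int) (waypoints : List Int) : List (List Int) :=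
  if route = [] ∨ waypoints = [] then []
  else
    bFinish route
      ((((PySem.List.enumerate (PySem.List.slice route (some 1) none) 1).foldl
          (bCutStep waypoints) ([], 0)).1).foldl (bSegStep route) ([], 0))

-- ===== PRECONDITION & SPEC =====
def Spec_split_route_into_segments (route : List Int) (waypoints : List Int) (out : List (List Int)) : Prop := out = split_route_into_segments_alt route waypoints
instance (route : List Int) (waypoints : List Int) (out : List (List Int)) : Decidable (Spec_split_route_into_segments route waypoints out) := by unfold Spec_split_route_into_segments; infer_instance

-- ===== CLAIM (what is proved, stated in full; the proofs are below) =====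
def Claim_equal_split_route_into_segments : Prop := ∀ (route : List Int) (waypoints : List Int), Dom_split_route_into_segments route waypoints → Spec_split_route_into_segments route waypoints (split_route_into_segments route waypoints)

-- ===== LEMMAS AND PROOFS =====

-- Common normal form: the segments produced from a pending segment `cur`,
-- waypoint index `wi`, over the remaining elements.
def segsFrom (wps : List Int) : Int → List Int → List Int → List (List Int)
  | _, cur, [] => if cur.length > 1 then [cur] else []
  | wi, cur, x :: xs =>
    if wi < (wps.length : Int) ∧ PySem.List.pyGetD wps wi 0 = x then
      (cur ++ [x]) :: segsFrom wps (wi + 1) [x] xs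
    else
      segsFrom wps wi (cur ++ [x]) xs

-- Cut positions (as naturals), scanning xs whose first element sits at index p.
def cutsN (wps : List Int) : Int → Nat → List Int → List Nat
  | _, _, [] => []
  | wi, p, x :: xs =>
    if wi < (wps.length : Int) ∧ PySem.List.pyGetD wps wi 0 = x then
      p :: cutsN wps (wi + 1) (p + 1) xs
    else
      cutsN wps wi (p + 1) xs

-- The segments B's second pass makes from a list of cut positions.
def segsOfN (route : List Int) : List Nat → Nat → List (List Int)
  | [], start =>
    if (route.drop start).length > 1 then [route.drop start] else []
  | c :: cs, start =>
    (route.drop start).take (c + 1 - start) :: segsOfN route cs c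

theorem aLoop_eq (wps : List Int) (xs : List Int) :
    ∀ (segs : List (List Int)) (cur : List Int) (wi : Int),
      aFinish (xs.foldl (aStep wps) (segs, cur, wi)) = segs ++ segsFrom wps wi cur xs := by
  induction xs with
  | nil =>
    intro segs cur wi
    simp only [List.foldl_nil, segsFrom, aFinish]
    split <;> simp
  | cons x xs ih =>
    intro segs cur wi
    by_cases h : wi < (wps.length : Int) ∧ PySem.List.pyGetD wps wi 0 = x
    · simp [List.foldl_cons, aStep, h, segsFrom, ih]
    · simp [List.foldl_cons, aStep, h, segsFrom, ih]

theorem bCuts_eq (wps : List Int) (xs : List Int) :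
    ∀ (acc : List Int) (wi : Int) (p : Nat),
      ((PySem.List.enumerate xs ((p : Nat) : Int)).foldl (bCutStep wps) (acc, wi)).1
        = acc ++ (cutsN wps wi p xs).map (fun (n : Nat) => (n : Int)) := by
  induction xs with
  | nil => intro acc wi p; simp [PySem.List.enumerate_nil, cutsN]
  | cons x xs ih =>
    intro acc wi p
    rw [PySem.List.enumerate_cons]
    have hc : ((p : Int) + 1) = (((p + 1 : Nat)) : Int) := by push_cast; ring
    by_cases h : wi < (wps.length : Int) ∧ PySem.List.pyGetD wps wi 0 = x
    · have hs : bCutStep wps (acc, wi) ((p : Int), x) = (acc ++ [(p : Int)], wi + 1) := by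
        simp [bCutStep, h]
      rw [List.foldl_cons, hs, hc, ih]
      simp [cutsN, h]
    · have hs : bCutStep wps (acc, wi) ((p : Int), x) = (acc, wi) := by
        simp [bCutStep, h]
      rw [List.foldl_cons, hs, hc, ih]
      simp [cutsN, h]

theorem bSegs_eq (route : List Int) (cs : List Nat) :
    ∀ (acc : List (List Int)) (start : Nat),
      bFinish route ((cs.map (fun (n : Nat) => (n : Int))).foldl (bSegStep route) (acc, ((start : Nat) : Int)))
        = acc ++ segsOfN route cs start := by
  induction cs with
  | nil =>
    intro acc start
    simp only [List.map_nil, List.foldl_nil, bFinish, PySem.List.slice_from_natCast, segsOfN]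
    split <;> simp
  | cons c cs ih =>
    intro acc start
    simp only [List.map_cons, List.foldl_cons, bSegStep]
    have hc : ((c : Int) + 1) = (((c + 1 : Nat)) : Int) := by push_cast; ring
    rw [hc, PySem.List.slice_natCast, ih]
    simp [segsOfN]

theorem main_eq (wps route : List Int) (xs : List Int) :
    ∀ (wi : Int) (p start : Nat) (cur : List Int),
      route.drop p = xs → start ≤ p →
      cur = (route.drop start).take (p - start) →
      segsOfN route (cutsN wps wi p xs) start = segsFrom wps wi cur xs := by
  induction xs with
  | nil =>
    intro wi p start cur hdrop hle hcur
    have hlen : route.length ≤ p := by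
      have := congrArg List.length hdrop
      simp only [List.length_drop, List.length_nil] at this
      omega
    have hcur' : cur = route.drop start := by
      rw [hcur, List.take_of_length_le]
      simp only [List.length_drop]; omega
    simp [cutsN, segsOfN, segsFrom, hcur']
  | cons x xs ih =>
    intro wi p start cur hdrop hle hcur
    have hdrop' : route.drop (p + 1) = xs := by
      have h1 : route.drop (p + 1) = (route.drop p).drop 1 := by
        rw [List.drop_drop]
      rw [h1, hdrop]; simp
    have hget : (route.drop start)[p - start]? = some x := by
      rw [List.getElem?_drop]
      have hps : start + (p - start) = p := by omega
      rw [hps, ← List.head?_drop, hdrop]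
      simp
    have hkey : (route.drop start).take (p + 1 - start) = cur ++ [x] := by
      have h1 : p + 1 - start = (p - start) + 1 := by omega
      rw [h1, List.take_add_one, hget, hcur]
      simp
    by_cases h : wi < (wps.length : Int) ∧ PySem.List.pyGetD wps wi 0 = x
    · have IH := ih (wi + 1) (p + 1) p [x] hdrop' (by omega) (by rw [hdrop]; simp)
      simp [cutsN, segsOfN, segsFrom, h, hkey, IH]
    · have IH := ih wi (p + 1) start (cur ++ [x]) hdrop' (by omega) hkey.symm
      simp [cutsN, segsFrom, h, IH]

theorem bCuts_eq1 (wps : List Int) (xs : List Int) :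
    ((PySem.List.enumerate xs 1).foldl (bCutStep wps) ([], 0)).1
      = (cutsN wps 0 1 xs).map (fun (n : Nat) => (n : Int)) := by
  simpa using bCuts_eq wps xs [] 0 1

theorem bSegs_eq0 (route : List Int) (cs : List Nat) :
    bFinish route ((cs.map (fun (n : Nat) => (n : Int))).foldl (bSegStep route) ([], 0))
      = segsOfN route cs 0 := by
  simpa using bSegs_eq route cs [] 0

-- ===== VERDICT (by name: the statement is the Claim_ definition above) =====
theorem split_route_into_segments_spec : Claim_equal_split_route_into_segments := by
  intro route waypoints _
  unfold Spec_split_route_into_segments split_route_into_segments split_route_into_segments_alt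
  match route with
  | [] => simp
  | r0 :: rest =>
    by_cases hw : waypoints = []
    · simp [hw]
    · simp only [hw, List.cons_ne_nil, or_self, not_false_eq_true, if_neg]
      rw [aLoop_eq]
      have htail : PySem.List.slice (r0 :: rest) (some 1) none = rest := by
        rw [PySem.List.slice_from_one]; rfl
      rw [htail, bCuts_eq1, bSegs_eq0,
        main_eq waypoints (r0 :: rest) rest 0 1 0 [r0] rfl (by omega) (by simp)]
      simp
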